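-- pv_equiv track=rewrite | github.com/sofiacolombo/advent-code | 04-12/paper-rolls.py | getCountFromCoords
-- ===== SOURCE A (Python) =====
-- def getCountFromCoords(coords, fullList):
--     y = coords[0]
--     x = coords[1]
--
--     adj = [(y-1,x-1), (y-1, x), (y-1, x+1),
--            (y, x-1),             (y, x+1),
--            (y+1, x-1), (y+1, x), (y+1, x+1)]
--
--     local_count = 0
--     for couple in adj:
--         if couple[0] < 0 or couple[1] < 0:
--             continue
--
--         if couple in fullList:
--             local_count+=1
--     return local_count
-- ===== SOURCE B (Python) =====
-- def getCountFromCoords(coords, fullList):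
--     y, x = coords
--     return len({(py, px) for (py, px) in fullList
--                 if py >= 0 and px >= 0 and (py, px) != (y, x)
--                 and abs(py - y) <= 1 and abs(px - x) <= 1})
-- ===== Notes on version B (the rewrite author's own statement) =====
-- stated objective: alternative
-- what changed: Instead of enumerating the 8 candidate neighbor coordinates and testing each for membership in fullList, B scans fullList once and counts (deduplicated via a set) the points that lie in the 8-neighborhood of coords with both components nonnegative.
import Mathlib
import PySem

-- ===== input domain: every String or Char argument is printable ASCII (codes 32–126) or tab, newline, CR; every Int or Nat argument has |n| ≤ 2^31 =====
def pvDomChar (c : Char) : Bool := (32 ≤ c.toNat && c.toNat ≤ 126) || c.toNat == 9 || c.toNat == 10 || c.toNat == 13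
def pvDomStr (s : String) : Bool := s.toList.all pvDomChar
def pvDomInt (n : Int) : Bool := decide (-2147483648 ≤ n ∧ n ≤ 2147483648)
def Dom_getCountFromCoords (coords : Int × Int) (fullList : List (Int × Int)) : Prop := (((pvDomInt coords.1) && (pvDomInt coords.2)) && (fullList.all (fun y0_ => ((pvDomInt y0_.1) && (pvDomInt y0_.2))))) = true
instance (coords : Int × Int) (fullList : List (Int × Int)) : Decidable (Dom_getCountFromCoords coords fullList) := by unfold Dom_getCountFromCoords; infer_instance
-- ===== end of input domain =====

-- B replaces A's enumeration of the 8 candidate neighbors (each tested for membership in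
-- fullList) by one pass over fullList, counting as a set the points in the 8-neighborhood;
-- objective: alternative (same result, different traversal).

-- ===== PORT A =====
def getCountFromCoords (coords : Int × Int) (fullList : List (Int × Int)) : Int :=
  let y := coords.1
  let x := coords.2
  let adj : List (Int × Int) :=
    [(y-1, x-1), (y-1, x), (y-1, x+1),
     (y, x-1),             (y, x+1),
     (y+1, x-1), (y+1, x), (y+1, x+1)]
  adj.foldl (fun local_count couple =>
    if couple.1 < 0 ∨ couple.2 < 0 then local_count
    else if couple ∈ fullList then local_count + 1
    else local_count) 0

-- ===== PORT B =====
-- set comprehension over fullList; len of the resulting set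
def getCountFromCoords_alt (coords : Int × Int) (fullList : List (Int × Int)) : Int :=
  let y := coords.1
  let x := coords.2
  PySem.Set.len (PySem.Set.ofList (fullList.filter (fun p =>
    decide (0 ≤ p.1 ∧ 0 ≤ p.2 ∧ p ≠ (y, x) ∧ (p.1 - y).natAbs ≤ 1 ∧ (p.2 - x).natAbs ≤ 1))))

-- ===== PRECONDITION & SPEC =====
def Spec_getCountFromCoords (coords : Int × Int) (fullList : List (Int × Int)) (out : Int) : Prop := out = getCountFromCoords_alt coords fullList
instance (coords : Int × Int) (fullList : List (Int × Int)) (out : Int) : Decidable (Spec_getCountFromCoords coords fullList out) := by unfold Spec_getCountFromCoords; infer_instance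

-- ===== CLAIM (what is proved, stated in full; the proofs are below) =====
def Claim_equal_getCountFromCoords : Prop := ∀ (coords : Int × Int) (fullList : List (Int × Int)), Dom_getCountFromCoords coords fullList → Spec_getCountFromCoords coords fullList (getCountFromCoords coords fullList)

-- ===== LEMMAS AND PROOFS =====

-- A's loop adds 1 per surviving element: it is acc + length of the filtered list.
theorem pv_fold_count (fullList : List (Int × Int)) (l : List (Int × Int)) (acc : Int) :
    l.foldl (fun local_count couple =>
      if couple.1 < 0 ∨ couple.2 < 0 then local_count
      else if couple ∈ fullList then local_count + 1
      else local_count) acc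
    = acc + ((l.filter (fun c => decide (¬(c.1 < 0 ∨ c.2 < 0) ∧ c ∈ fullList))).length : Int) := by
  induction l generalizing acc with
  | nil => simp
  | cons c t ih =>
    rw [List.foldl_cons, List.filter_cons]
    by_cases h1 : c.1 < 0 ∨ c.2 < 0
    · rw [if_pos h1, if_neg (by simp only [decide_eq_true_eq]; rintro ⟨h, _⟩; exact h h1), ih]
    · rw [if_neg h1]
      by_cases h2 : c ∈ fullList
      · rw [if_pos h2, if_pos (by simp only [decide_eq_true_eq]; exact ⟨h1, h2⟩), ih,
          List.length_cons]
        push_cast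
        ring
      · rw [if_neg h2, if_neg (by simp only [decide_eq_true_eq]; rintro ⟨_, h⟩; exact h2 h), ih]

theorem pv_adj_nodup (y x : Int) :
    ([(y-1, x-1), (y-1, x), (y-1, x+1), (y, x-1), (y, x+1),
      (y+1, x-1), (y+1, x), (y+1, x+1)] : List (Int × Int)).Nodup := by
  simp [List.nodup_cons, List.mem_cons, Prod.mk.injEq]
  omega

theorem pv_mem_adj (y x : Int) (a : Int × Int) :
    a ∈ ([(y-1, x-1), (y-1, x), (y-1, x+1), (y, x-1), (y, x+1),
          (y+1, x-1), (y+1, x), (y+1, x+1)] : List (Int × Int))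
    ↔ (a ≠ (y, x) ∧ (a.1 - y).natAbs ≤ 1 ∧ (a.2 - x).natAbs ≤ 1) := by
  obtain ⟨p, q⟩ := a
  simp [List.mem_cons, Prod.ext_iff]
  omega

-- ===== VERDICT (by name: the statement is the Claim_ definition above) =====
theorem getCountFromCoords_spec : Claim_equal_getCountFromCoords := by
  intro coords fullList _
  unfold Spec_getCountFromCoords getCountFromCoords getCountFromCoords_alt
  obtain ⟨y, x⟩ := coords
  simp only [pv_fold_count, zero_add, PySem.Set.len]
  congr 1
  apply List.Perm.length_eq
  rw [List.perm_ext_iff_of_nodup]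
  · intro a
    rw [List.mem_filter, PySem.Set.mem_ofList, List.mem_filter, pv_mem_adj]
    simp only [decide_eq_true_eq]
    constructor
    · rintro ⟨⟨hne, h1, h2⟩, hnn, hmem⟩
      exact ⟨hmem, by omega, by omega, hne, h1, h2⟩
    · rintro ⟨hmem, hp1, hp2, hne, h1, h2⟩
      exact ⟨⟨hne, h1, h2⟩, by omega, hmem⟩
  · exact (pv_adj_nodup y x).filter _
  · exact PySem.Set.nodup_ofList _
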